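-- pv_equiv track=rewrite | github.com/slipstream/SlipStreamConnectors | opennebula/python/tar/slipstream_opennebula/OpenNebulaServiceOffersCommand.py | _get_ram_range
-- ===== SOURCE A (Python) =====
-- def _get_ram_range(max_ram):
--     ram_list = [512]
--
--     exp = 5
--     while True:
--         last_ram = ram_list[-1]
--         next_ram = None
--
--         if last_ram < 1024:
--             next_ram = last_ram + 256
--         elif last_ram < 6144:
--             next_ram = last_ram + 1024
--         elif last_ram < 16384:
--             next_ram = last_ram + 2048
--         else:
--             next_ram = 2 ** exp * 1024
--             exp += 1
--
--         if next_ram is not None and next_ram <= max_ram: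
--             ram_list.append(next_ram)
--         else:
--             break
--
--     return ram_list
-- ===== SOURCE B (Python) =====
-- def _get_ram_range(max_ram):
--     # candidate sizes after the seeded 512: fixed arithmetic ranges, then a geometric tail
--     candidates = (list(range(768, 1025, 256))
--                   + list(range(2048, 6145, 1024))
--                   + list(range(8192, 16385, 2048)))
--     result = [512]
--     for c in candidates:
--         if c > max_ram:
--             return result
--         result.append(c)
--     v = 32768
--     while v <= max_ram:
--         result.append(v)
--         v *= 2
--     return result
-- ===== Notes on version B (the rewrite author's own statement) =====
-- stated objective: simpler
-- what changed: B constructs the known increasing candidate sequence (three fixed arithmetic ranges, then a doubling geometric tail) and truncates it at max_ram, seeding the minimum size unconditionally, instead of A's stateful branch-per-step loop that derives each next size from the last appended one and an exponent counter.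
import Mathlib
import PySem

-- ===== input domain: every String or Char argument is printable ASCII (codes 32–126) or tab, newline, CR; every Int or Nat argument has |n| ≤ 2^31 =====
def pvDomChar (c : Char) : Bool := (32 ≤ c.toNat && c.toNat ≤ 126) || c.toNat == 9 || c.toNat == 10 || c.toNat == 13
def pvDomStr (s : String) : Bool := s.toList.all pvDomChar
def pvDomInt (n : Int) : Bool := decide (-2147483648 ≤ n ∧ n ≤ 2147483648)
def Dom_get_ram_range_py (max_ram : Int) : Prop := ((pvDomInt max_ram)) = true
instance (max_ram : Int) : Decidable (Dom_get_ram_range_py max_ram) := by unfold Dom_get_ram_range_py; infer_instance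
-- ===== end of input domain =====

-- B builds the increasing candidate sequence (arithmetic ranges then a doubling tail) and
-- truncates it at max_ram, instead of A's stateful branch-per-step next-value loop; objective: simpler.

-- ===== PORT A =====
-- A's `while True` loop, fueled: on Dom (|max_ram| ≤ 2^31) the loop runs at most 30
-- iterations, so fuel 76 is never exhausted and the port is exact there.
-- ram_list is never empty, so `(pyGet? ram_list (-1)).getD 0` is exactly ram_list[-1].
def get_ram_range_py_loop (max_ram : Int) : Nat → List Int → Nat → List Int
  | 0, ram_list, _ => ram_list
  | fuel+1, ram_list, exp =>
    let last_ram := (PySem.List.pyGet? ram_list (-1)).getD 0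
    let p : Int × Nat :=
      if last_ram < 1024 then (last_ram + 256, exp)
      else if last_ram < 6144 then (last_ram + 1024, exp)
      else if last_ram < 16384 then (last_ram + 2048, exp)
      else ((2:Int) ^ exp * 1024, exp + 1)
    if p.1 ≤ max_ram then get_ram_range_py_loop max_ram fuel (ram_list ++ [p.1]) p.2
    else ram_list

def get_ram_range_py (max_ram : Int) : List Int :=
  get_ram_range_py_loop max_ram 76 [512] 5

-- ===== PORT B =====
-- B's `while v <= max_ram` tail, fueled: on Dom it runs at most 18 iterations, so fuel 64
-- is never exhausted and the port is exact there.
def pvGeomLoop (max_ram : Int) : Nat → Int → List Int → List Int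
  | 0, _, result => result
  | fuel+1, v, result =>
    if v ≤ max_ram then pvGeomLoop max_ram fuel (v * 2) (result ++ [v]) else result

-- B's `for c in candidates` loop with its early return; fallthrough enters the while loop.
def pvArithLoop (max_ram : Int) : List Int → List Int → List Int
  | [], result => pvGeomLoop max_ram 64 32768 result
  | c :: cs, result =>
    if c > max_ram then result else pvArithLoop max_ram cs (result ++ [c])

def get_ram_range_py_alt (max_ram : Int) : List Int :=
  let candidates := PySem.List.pyRange 768 1025 256 ++ PySem.List.pyRange 2048 6145 1024
                      ++ PySem.List.pyRange 8192 16385 2048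
  pvArithLoop max_ram candidates [512]

-- ===== PRECONDITION & SPEC =====
def Spec_get_ram_range_py (max_ram : Int) (out : List Int) : Prop := out = get_ram_range_py_alt max_ram
instance (max_ram : Int) (out : List Int) : Decidable (Spec_get_ram_range_py max_ram out) := by unfold Spec_get_ram_range_py; infer_instance

-- ===== CLAIM (what is proved, stated in full; the proofs are below) =====
def Claim_equal_get_ram_range_py : Prop := ∀ (max_ram : Int), Dom_get_ram_range_py max_ram → Spec_get_ram_range_py max_ram (get_ram_range_py max_ram)

-- ===== LEMMAS AND PROOFS =====

-- the three concatenated ranges evaluate to the concrete candidate list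
theorem candEq :
    PySem.List.pyRange 768 1025 256 ++ PySem.List.pyRange 2048 6145 1024
      ++ PySem.List.pyRange 8192 16385 2048
    = [768, 1024, 2048, 3072, 4096, 5120, 6144, 8192, 10240, 12288, 14336, 16384] := by
  decide

-- once the last element is ≥ 16384, A's loop and B's geometric loop coincide (same fuel)
theorem geom_eq (max_ram : Int) :
    ∀ (f : Nat) (exp : Nat) (acc : List Int) (l : Int), 16384 ≤ l → 4 ≤ exp →
      get_ram_range_py_loop max_ram f (acc ++ [l]) exp
        = pvGeomLoop max_ram f ((2:Int) ^ exp * 1024) (acc ++ [l]) := by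
  intro f
  induction f with
  | zero => intro exp acc l _ _; rfl
  | succ f ih =>
    intro exp acc l hl hexp
    have h16 : (16384:Int) ≤ (2:Int) ^ exp * 1024 := by
      have : (2:Int) ^ 4 ≤ (2:Int) ^ exp := pow_le_pow_right₀ (by norm_num) hexp
      nlinarith
    simp only [get_ram_range_py_loop, pvGeomLoop, PySem.List.pyGet?_neg_one,
      List.getLast?_concat, Option.getD_some]
    rw [if_neg (show ¬ l < 1024 by omega), if_neg (show ¬ l < 6144 by omega),
      if_neg (show ¬ l < 16384 by omega)]
    by_cases hc : (2:Int) ^ exp * 1024 ≤ max_ram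
    · rw [if_pos hc, if_pos hc]
      have := ih (exp + 1) (acc ++ [l]) ((2:Int) ^ exp * 1024) h16 (by omega)
      rw [List.append_assoc] at this ⊢
      rw [this]
      congr 1
      ring
    · rw [if_neg hc, if_neg hc]

-- one arithmetic step of A matches consuming one candidate in B
theorem step_both (max_ram : Int) (f f' : Nat) (hf : f = f' + 1) (acc : List Int)
    (l c : Int) (cs : List Int) (exp : Nat)
    (hc : (if l < 1024 then l + 256 else if l < 6144 then l + 1024 else l + 2048) = c)
    (hl : l < 16384)
    (ih : get_ram_range_py_loop max_ram f' ((acc ++ [l]) ++ [c]) exp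
            = pvArithLoop max_ram cs ((acc ++ [l]) ++ [c])) :
    get_ram_range_py_loop max_ram f (acc ++ [l]) exp
      = pvArithLoop max_ram (c :: cs) (acc ++ [l]) := by
  subst hf
  simp only [get_ram_range_py_loop, pvArithLoop, PySem.List.pyGet?_neg_one,
    List.getLast?_concat, Option.getD_some]
  by_cases h1 : l < 1024
  · rw [if_pos h1] at hc ⊢
    simp only [← hc] at *
    by_cases h2 : l + 256 ≤ max_ram
    · rw [if_pos h2, if_neg (by omega)]; exact ih
    · rw [if_neg h2, if_pos (by omega)]
  · rw [if_neg h1] at hc ⊢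
    by_cases h3 : l < 6144
    · rw [if_pos h3] at hc ⊢
      simp only [← hc] at *
      by_cases h2 : l + 1024 ≤ max_ram
      · rw [if_pos h2, if_neg (by omega)]; exact ih
      · rw [if_neg h2, if_pos (by omega)]
    · rw [if_neg h3] at hc ⊢
      rw [if_pos hl]
      simp only [← hc] at *
      by_cases h2 : l + 2048 ≤ max_ram
      · rw [if_pos h2, if_neg (by omega)]; exact ih
      · rw [if_neg h2, if_pos (by omega)]

theorem main_eq (max_ram : Int) :
    get_ram_range_py max_ram = get_ram_range_py_alt max_ram := by
  show get_ram_range_py_loop max_ram 76 [512] 5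
        = pvArithLoop max_ram (PySem.List.pyRange 768 1025 256
            ++ PySem.List.pyRange 2048 6145 1024 ++ PySem.List.pyRange 8192 16385 2048) [512]
  rw [candEq]
  have h0 : ([512] : List Int) = [] ++ [512] := rfl
  rw [h0]
  refine step_both max_ram 76 75 rfl [] 512 768 _ 5 (by norm_num) (by norm_num) ?_
  refine step_both max_ram 75 74 rfl _ 768 1024 _ 5 (by norm_num) (by norm_num) ?_
  refine step_both max_ram 74 73 rfl _ 1024 2048 _ 5 (by norm_num) (by norm_num) ?_
  refine step_both max_ram 73 72 rfl _ 2048 3072 _ 5 (by norm_num) (by norm_num) ?_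
  refine step_both max_ram 72 71 rfl _ 3072 4096 _ 5 (by norm_num) (by norm_num) ?_
  refine step_both max_ram 71 70 rfl _ 4096 5120 _ 5 (by norm_num) (by norm_num) ?_
  refine step_both max_ram 70 69 rfl _ 5120 6144 _ 5 (by norm_num) (by norm_num) ?_
  refine step_both max_ram 69 68 rfl _ 6144 8192 _ 5 (by norm_num) (by norm_num) ?_
  refine step_both max_ram 68 67 rfl _ 8192 10240 _ 5 (by norm_num) (by norm_num) ?_
  refine step_both max_ram 67 66 rfl _ 10240 12288 _ 5 (by norm_num) (by norm_num) ?_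
  refine step_both max_ram 66 65 rfl _ 12288 14336 _ 5 (by norm_num) (by norm_num) ?_
  refine step_both max_ram 65 64 rfl _ 14336 16384 _ 5 (by norm_num) (by norm_num) ?_
  show get_ram_range_py_loop max_ram 64 _ 5 = pvGeomLoop max_ram 64 32768 _
  have := geom_eq max_ram 64 5 ([512,768,1024,2048,3072,4096,5120,6144,8192,10240,12288,14336])
    16384 (by norm_num) (by norm_num)
  norm_num at this ⊢
  exact this

-- ===== VERDICT (by name: the statement is the Claim_ definition above) =====
theorem get_ram_range_py_spec : Claim_equal_get_ram_range_py := by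
  intro max_ram _
  show get_ram_range_py max_ram = get_ram_range_py_alt max_ram
  exact main_eq max_ram
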